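-- pv_equiv track=rewrite | github.com/NHLOCAL/Singles-Sorter | machine-learn/scrape_data/level0/clean_singer_list/2-find_duplic_singers.py | limit_common_names
-- ===== SOURCE A (Python) =====
-- from collections import Counter
--
-- def limit_common_names(name_list, max_occurrences=5):
--     name_counts = Counter(name_list)
--     limited_list = []
--     for name in name_list:
--         if name_counts[name] > max_occurrences:
--             limited_list.extend([name] * max_occurrences)
--             name_counts[name] = 0  # הגבלת השם ל-5 מופעים בלבד
--         elif name_counts[name] > 0:
--             limited_list.append(name)
--             name_counts[name] = 0  # הוספת השם רק פעם אחת לאחר שעברנו עליו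
--     return limited_list
-- ===== SOURCE B (Python) =====
-- from collections import Counter
--
-- def limit_common_names(name_list, max_occurrences=5):
--     # Iterate over the aggregated unique names (Counter preserves first-occurrence order)
--     result = []
--     for name, c in Counter(name_list).items():
--         if c > max_occurrences:
--             result += [name] * max_occurrences
--         else:
--             result.append(name)
--     return result
-- ===== Notes on version B (the rewrite author's own statement) =====
-- stated objective: simpler
-- what changed: B iterates once over the Counter's unique keys in first-occurrence order instead of scanning the full list while zeroing counts to skip already-emitted names.
import Mathlib
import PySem

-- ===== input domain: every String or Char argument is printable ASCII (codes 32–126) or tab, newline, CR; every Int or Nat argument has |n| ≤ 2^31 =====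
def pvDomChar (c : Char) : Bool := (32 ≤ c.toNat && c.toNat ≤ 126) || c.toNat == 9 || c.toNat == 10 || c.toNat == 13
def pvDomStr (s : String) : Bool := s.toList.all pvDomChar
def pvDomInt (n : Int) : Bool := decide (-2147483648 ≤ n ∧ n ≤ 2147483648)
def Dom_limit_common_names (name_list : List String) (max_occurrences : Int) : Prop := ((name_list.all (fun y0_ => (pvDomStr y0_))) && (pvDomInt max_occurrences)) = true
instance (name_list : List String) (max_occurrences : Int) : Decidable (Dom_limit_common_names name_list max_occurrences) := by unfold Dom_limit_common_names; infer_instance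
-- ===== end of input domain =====

-- B replaces A's full-list scan with count-zeroing by a single pass over the Counter's unique keys (simpler).

-- ===== PORT A =====
def limit_common_names (name_list : List String) (max_occurrences : Int) : List String :=
  let name_counts : PySem.Dict String Int := PySem.Dict.counter name_list
  (name_list.foldl
    (fun (st : PySem.Dict String Int × List String) name =>
      if st.1.getD name 0 > max_occurrences then
        (st.1.insert name 0, st.2 ++ List.replicate max_occurrences.toNat name)
      else if st.1.getD name 0 > 0 then
        (st.1.insert name 0, st.2 ++ [name])
      else st)
    (name_counts, [])).2

-- ===== PORT B =====
def limit_common_names_alt (name_list : List String) (max_occurrences : Int) : List String :=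
  (PySem.Dict.counter name_list).items.foldl
    (fun result (p : String × Int) =>
      if p.2 > max_occurrences then result ++ List.replicate max_occurrences.toNat p.1
      else result ++ [p.1])
    []

-- ===== PRECONDITION & SPEC =====
def Spec_limit_common_names (name_list : List String) (max_occurrences : Int) (out : List String) : Prop := out = limit_common_names_alt name_list max_occurrences
instance (name_list : List String) (max_occurrences : Int) (out : List String) : Decidable (Spec_limit_common_names name_list max_occurrences out) := by unfold Spec_limit_common_names; infer_instance

-- ===== CLAIM (what is proved, stated in full; the proofs are below) =====
def Claim_equal_limit_common_names : Prop := ∀ (name_list : List String) (max_occurrences : Int), Dom_limit_common_names name_list max_occurrences → Spec_limit_common_names name_list max_occurrences (limit_common_names name_list max_occurrences)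

-- ===== LEMMAS AND PROOFS =====

-- what one name contributes to the output
def pvEmit1 (m : Int) (cnt : String → Int) (x : String) : List String :=
  if cnt x > m then List.replicate m.toNat x else [x]

-- the names emitted by A's loop over l, given the set of names already emitted
def pvEmit (m : Int) (cnt : String → Int) : List String → List String → List String
  | _, [] => []
  | seen, x :: t =>
    if x ∈ seen then pvEmit m cnt seen t
    else pvEmit1 m cnt x ++ pvEmit m cnt (x :: seen) t

theorem pvEmit_congr (m : Int) (cnt : String → Int) (l : List String) :
    ∀ s s' : List String, (∀ y, y ∈ s ↔ y ∈ s') → pvEmit m cnt s l = pvEmit m cnt s' l := by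
  induction l with
  | nil => intro s s' _; rfl
  | cons x t ih =>
    intro s s' h
    simp only [pvEmit]
    by_cases hx : x ∈ s
    · rw [if_pos hx, if_pos ((h x).mp hx), ih s s' h]
    · rw [if_neg hx, if_neg (fun hx' => hx ((h x).mpr hx'))]
      rw [ih (x :: s) (x :: s') (by intro y; simp [h y])]

-- A's loop invariant: the dict maps already-emitted names to 0 and fresh ones to cnt
theorem pvLoopA (m : Int) (cnt : String → Int) (l : List String) :
    ∀ (d : PySem.Dict String Int) (out seen : List String),
    (∀ x ∈ l, d.getD x 0 = if x ∈ seen then 0 else cnt x) →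
    (∀ x ∈ l, x ∉ seen → 1 ≤ cnt x) →
    (l.foldl
      (fun (st : PySem.Dict String Int × List String) name =>
        if st.1.getD name 0 > m then
          (st.1.insert name 0, st.2 ++ List.replicate m.toNat name)
        else if st.1.getD name 0 > 0 then
          (st.1.insert name 0, st.2 ++ [name])
        else st)
      (d, out)).2 = out ++ pvEmit m cnt seen l := by
  induction l with
  | nil => intro d out seen _ _; simp [pvEmit]
  | cons x t ih =>
    intro d out seen hd hpos
    have hdx := hd x (by simp)
    simp only [List.foldl_cons, pvEmit]
    by_cases hx : x ∈ seen
    · rw [if_pos hx] at hdx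
      have hins : ∀ y ∈ t, (d.insert x 0).getD y 0 = if y ∈ seen then 0 else cnt y := by
        intro y hy
        rw [PySem.Dict.getD_insert]
        by_cases hyx : y = x
        · simp [hyx, hx]
        · rw [if_neg hyx, hd y (List.mem_cons_of_mem _ hy)]
      have ht : ∀ y ∈ t, y ∉ seen → 1 ≤ cnt y := fun y hy => hpos y (by simp [hy])
      rw [if_pos hx]
      by_cases hm : (0 : Int) > m
      · rw [if_pos (by simpa [hdx] using hm)]
        have : m.toNat = 0 := Int.toNat_of_nonpos (by omega)
        simpa [this] using ih (d.insert x 0) out seen hins ht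
      · rw [if_neg (by simpa [hdx] using hm), if_neg (by simp [hdx])]
        exact ih d out seen (fun y hy => hd y (by simp [hy])) ht
    · rw [if_neg hx] at hdx
      have hc1 : 1 ≤ cnt x := hpos x (by simp) hx
      have hins : ∀ y ∈ t, (d.insert x 0).getD y 0 = if y ∈ x :: seen then 0 else cnt y := by
        intro y hy
        rw [PySem.Dict.getD_insert]
        by_cases hyx : y = x
        · simp [hyx]
        · rw [if_neg hyx, hd y (List.mem_cons_of_mem _ hy)]
          simp [List.mem_cons, hyx]
      have ht : ∀ y ∈ t, y ∉ x :: seen → 1 ≤ cnt y := by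
        intro y hy hs; exact hpos y (by simp [hy]) (fun h => hs (by simp [h]))
      rw [if_neg hx]
      by_cases hm : cnt x > m
      · rw [if_pos (by rw [hdx]; exact hm)]
        rw [ih (d.insert x 0) _ (x :: seen) hins ht]
        simp [pvEmit1, hm]
      · rw [if_neg (by rw [hdx]; exact hm), if_pos (by rw [hdx]; omega)]
        rw [ih (d.insert x 0) _ (x :: seen) hins ht]
        simp [pvEmit1, hm]

-- B's fold over the unique names equals pvEmit
theorem pvLoopB (m : Int) (cnt : String → Int) (l : List String) :
    ∀ s : List String,
    (l.foldl PySem.Set.add s).flatMap (pvEmit1 m cnt) =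
      s.flatMap (pvEmit1 m cnt) ++ pvEmit m cnt s l := by
  induction l with
  | nil => intro s; simp [pvEmit]
  | cons x t ih =>
    intro s
    simp only [List.foldl_cons, pvEmit]
    by_cases hx : x ∈ s
    · rw [if_pos hx]
      have : PySem.Set.add s x = s := by simp [PySem.Set.add, hx]
      rw [this, ih s]
    · rw [if_neg hx]
      have : PySem.Set.add s x = s ++ [x] := by simp [PySem.Set.add, hx]
      rw [this, ih (s ++ [x])]
      rw [pvEmit_congr m cnt t (s ++ [x]) (x :: s) (by intro y; simp; tauto)]
      simp [List.append_assoc]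

-- ===== VERDICT (by name: the statement is the Claim_ definition above) =====
theorem limit_common_names_spec : Claim_equal_limit_common_names := by
  intro nl m _
  unfold Spec_limit_common_names limit_common_names limit_common_names_alt
  set cnt : String → Int := fun x => (nl.count x : Int) with hcnt
  have hB : (PySem.Dict.counter nl).items.foldl
      (fun result (p : String × Int) =>
        if p.2 > m then result ++ List.replicate m.toNat p.1 else result ++ [p.1]) []
      = (PySem.Set.ofList nl).flatMap (pvEmit1 m cnt) := by
    rw [PySem.Dict.items_counter]
    rw [List.foldl_map]
    have := PySem.List.foldl_append_eq_flatMap (l := PySem.Set.ofList nl)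
      (g := pvEmit1 m cnt) (acc := ([] : List String))
    rw [show (fun (result : List String) (k : String) =>
          if ((nl.count k : Int), k).1 > m then result ++ List.replicate m.toNat k
          else result ++ [k]) = (fun result k => result ++ pvEmit1 m cnt k) from by
        funext result k; simp only [pvEmit1]; split_ifs with h
        · rfl
        · rfl]
    simpa using this
  rw [hB]
  have hA := pvLoopA m cnt nl (PySem.Dict.counter nl) [] []
    (fun x _ => by simp [PySem.Dict.getD_counter, hcnt])
    (fun x hx _ => by simpa [hcnt] using hx)
  rw [hA]
  rw [PySem.Set.ofList_eq_foldl, pvLoopB m cnt nl []]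
  simp
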